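-- pv_equiv track=rewrite | github.com/ozahirnyi/telegramBot-Irishaabeauty | back/binary.py | path_update
-- ===== SOURCE A (Python) =====
-- def path_update(direction, current_path):
--     res = direction
--     buf = []
--
--     while current_path:
--         buf.append(current_path % 10)
--         current_path //= 10
--     buf.reverse()
--     for i in buf:
--         res = res * 10 + i
--     return res
-- ===== SOURCE B (Python) =====
-- def path_update(direction, current_path):
--     pow10 = 1
--     n = current_path
--     while n > 0:
--         pow10 *= 10
--         n //= 10
--     return direction * pow10 + current_path
-- ===== Notes on version B (the rewrite author's own statement) =====
-- stated objective: simpler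
-- what changed: Replaces the digit-buffer build, reversal and fold with a single pass that computes 10^(digit count) and returns direction * pow10 + current_path in one arithmetic expression.
import Mathlib
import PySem

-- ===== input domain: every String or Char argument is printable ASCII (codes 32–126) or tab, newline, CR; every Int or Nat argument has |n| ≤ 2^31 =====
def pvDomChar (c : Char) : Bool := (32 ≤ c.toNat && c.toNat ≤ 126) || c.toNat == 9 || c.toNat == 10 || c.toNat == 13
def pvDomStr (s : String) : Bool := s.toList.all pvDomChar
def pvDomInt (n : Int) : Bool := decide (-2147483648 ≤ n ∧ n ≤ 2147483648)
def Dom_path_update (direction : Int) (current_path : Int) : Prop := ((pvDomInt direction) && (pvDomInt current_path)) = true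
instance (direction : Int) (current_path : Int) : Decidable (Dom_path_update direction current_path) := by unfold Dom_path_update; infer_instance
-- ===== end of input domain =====

-- B replaces the digit-buffer build/reverse/fold with one pass computing 10^(digit count) and a single arithmetic expression; same cost, simpler.


-- ===== PORT A =====
-- the while loop: collect current_path's digits low-to-high (the `0 < cp` guard only
-- serves termination; on negatives, outside Pre_, the Python loop never terminates)
def pathBuf (cp : Int) : List Int :=
  if h : 0 < cp then
    PySem.Int.mod cp 10 :: pathBuf (PySem.Int.floordiv cp 10)
  else []
termination_by cp.toNat
decreasing_by
  have h1 : PySem.Int.floordiv cp 10 = cp / 10 := PySem.Int.floordiv_eq_ediv_of_pos (by omega)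
  rw [h1]; omega

def path_update (direction : Int) (current_path : Int) : Int :=
  ((pathBuf current_path).reverse).foldl (fun res i => res * 10 + i) direction

-- ===== PORT B =====
-- the while loop of Source B: pow10 = 10^(number of digits of n), n //= 10 each step
def pathPow10 (pow10 : Int) (n : Int) : Int :=
  if h : 0 < n then pathPow10 (pow10 * 10) (PySem.Int.floordiv n 10)
  else pow10
termination_by n.toNat
decreasing_by
  have h1 : PySem.Int.floordiv n 10 = n / 10 := PySem.Int.floordiv_eq_ediv_of_pos (by omega)
  rw [h1]; omega

def path_update_alt (direction : Int) (current_path : Int) : Int :=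
  direction * pathPow10 1 current_path + current_path

-- ===== PRECONDITION & SPEC =====
-- A's while loop never terminates when current_path < 0 (Python // floors: -1 // 10 = -1 forever)
def Pre_path_update (direction : Int) (current_path : Int) : Prop := 0 ≤ current_path
instance (direction : Int) (current_path : Int) : Decidable (Pre_path_update direction current_path) := by unfold Pre_path_update; infer_instance
def pvWitness_path_update : Int × Int := (3, 142)

def Spec_path_update (direction : Int) (current_path : Int) (out : Int) : Prop := out = path_update_alt direction current_path
instance (direction : Int) (current_path : Int) (out : Int) : Decidable (Spec_path_update direction current_path out) := by unfold Spec_path_update; infer_instance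

-- ===== CLAIM (what is proved, stated in full; the proofs are below) =====
def Claim_equal_path_update : Prop := ∀ (direction : Int) (current_path : Int), Dom_path_update direction current_path → Pre_path_update direction current_path → Spec_path_update direction current_path (path_update direction current_path)

-- ===== LEMMAS AND PROOFS =====

theorem pathPow10_factor (p n : Int) : pathPow10 p n = p * pathPow10 1 n := by
  by_cases h : 0 < n
  · conv_lhs => rw [pathPow10]
    conv_rhs => rw [pathPow10]
    rw [dif_pos h, dif_pos h, pathPow10_factor (p * 10), pathPow10_factor (1 * 10)]
    ring
  · conv_lhs => rw [pathPow10]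
    conv_rhs => rw [pathPow10]
    rw [dif_neg h, dif_neg h]; ring
termination_by n.toNat
decreasing_by
  all_goals
    have h1 : PySem.Int.floordiv n 10 = n / 10 := PySem.Int.floordiv_eq_ediv_of_pos (by omega)
    rw [h1]; omega

theorem pathBuf_fold (cp : Int) (hcp : 0 ≤ cp) (d : Int) :
    ((pathBuf cp).reverse).foldl (fun res i => res * 10 + i) d = d * pathPow10 1 cp + cp := by
  by_cases h : 0 < cp
  · have hq : PySem.Int.floordiv cp 10 = cp / 10 := PySem.Int.floordiv_eq_ediv_of_pos (by omega)
    have hr : PySem.Int.mod cp 10 = cp % 10 := PySem.Int.mod_eq_emod_of_pos (by omega)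
    have hq0 : 0 ≤ cp / 10 := by positivity
    have ih := pathBuf_fold (cp / 10) hq0 d
    have h10 : pathPow10 1 cp = 10 * pathPow10 1 (cp / 10) := by
      conv_lhs => rw [pathPow10]
      rw [dif_pos h, hq, pathPow10_factor]; ring
    conv_lhs => rw [pathBuf]
    rw [dif_pos h, List.reverse_cons, List.foldl_append, hq, ih, List.foldl_cons,
      List.foldl_nil, hr, h10]
    linear_combination Int.ediv_add_emod cp 10
  · rw [pathBuf, dif_neg h, pathPow10, dif_neg h]
    simp
    omega
termination_by cp.toNat
decreasing_by
  omega

-- ===== VERDICT (by name: the statement is the Claim_ definition above) =====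
theorem path_update_spec : Claim_equal_path_update := by
  intro d cp _ hpre
  show path_update d cp = path_update_alt d cp
  unfold path_update path_update_alt
  exact pathBuf_fold cp hpre d
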